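-- pv_equiv track=rewrite | github.com/guswns8431/algorithm | 백준/Bronze/20362. 유니대전 퀴즈쇼/유니대전 퀴즈쇼.py | count_unfortunate
-- ===== SOURCE A (Python) =====
-- def count_unfortunate(N, winner, chats):
--     # 당첨자의 위치 찾기
--     winner_pos = 0
--     for i in range(N):
--         if chats[i][0] == winner:
--             winner_pos = i
--             break
--
--     # 당첨자보다 먼저 정답('duck')을 말한 사람 수 세기
--     count = 0
--     winner_answer = chats[winner_pos][1]
--     for i in range(winner_pos):
--         if chats[i][1] == winner_answer:
--             count += 1
--
--     return count
-- ===== SOURCE B (Python) =====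
-- def count_unfortunate(N, winner, chats):
--     # One left-to-right pass: maintain a frequency table of answers seen so far;
--     # on reaching the winner, the table already holds the answer's earlier count.
--     counts = {}
--     for i, (name, answer) in enumerate(chats):
--         if i >= N:
--             break
--         if name == winner:
--             return counts.get(answer, 0)
--         counts[answer] = counts.get(answer, 0) + 1
--     return 0
-- ===== Notes on version B (the rewrite author's own statement) =====
-- stated objective: alternative
-- what changed: Replaces A's two loops (index scan for the winner's position, then a second scan over the prefix counting matching answers) with one single pass that maintains a running frequency dictionary of answers and returns the winner's answer count the moment the winner is reached.
import Mathlib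
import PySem

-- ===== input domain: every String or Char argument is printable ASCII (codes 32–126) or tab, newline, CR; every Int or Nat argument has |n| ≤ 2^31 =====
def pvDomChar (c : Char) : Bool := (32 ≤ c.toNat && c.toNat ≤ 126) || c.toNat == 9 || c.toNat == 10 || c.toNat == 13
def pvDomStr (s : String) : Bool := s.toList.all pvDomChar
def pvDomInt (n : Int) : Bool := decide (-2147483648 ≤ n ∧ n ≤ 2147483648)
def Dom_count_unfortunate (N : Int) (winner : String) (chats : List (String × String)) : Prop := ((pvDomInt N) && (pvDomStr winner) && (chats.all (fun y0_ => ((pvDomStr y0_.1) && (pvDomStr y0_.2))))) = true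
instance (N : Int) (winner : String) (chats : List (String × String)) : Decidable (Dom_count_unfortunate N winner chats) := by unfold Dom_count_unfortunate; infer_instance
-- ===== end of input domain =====

-- B replaces A's two loops (find the winner's index, then re-scan the prefix counting equal
-- answers) by a single pass with a running answer-frequency dictionary; same O(n) cost.

-- ===== PORT A =====
-- first loop: scan the index list range(N); 'none' from pyGet? is Python's IndexError (excluded by Pre_)
def pvFindWinnerPos (chats : List (String × String)) (winner : String) : List Int → Int
  | [] => 0
  | i :: rest =>
    match PySem.List.pyGet? chats i with
    | none => 0  -- IndexError in Python; unreachable under Pre_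
    | some p => if p.1 = winner then i else pvFindWinnerPos chats winner rest

def count_unfortunate (N : Int) (winner : String) (chats : List (String × String)) : Int :=
  let winner_pos := pvFindWinnerPos chats winner (PySem.List.pyRange 0 N 1)
  -- chats[winner_pos][1]; 'none' = IndexError (excluded by Pre_)
  let winner_answer := ((PySem.List.pyGet? chats winner_pos).map Prod.snd).getD ""
  -- for i in range(winner_pos): if chats[i][1] == winner_answer: count += 1
  (PySem.List.pyRange 0 winner_pos 1).foldl
    (fun count i => if (PySem.List.pyGetD chats i ("", "")).2 = winner_answer then count + 1 else count) 0

-- ===== PORT B =====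
def pvGoB (N : Int) (winner : String) : List (String × String) → Int → PySem.Dict String Int → Int
  | [], _, _ => 0
  | (name, answer) :: rest, i, counts =>
    if N ≤ i then 0
    else if name = winner then counts.getD answer 0
    else pvGoB N winner rest (i + 1) (counts.insert answer (counts.getD answer 0 + 1))

def count_unfortunate_alt (N : Int) (winner : String) (chats : List (String × String)) : Int :=
  pvGoB N winner chats 0 PySem.Dict.empty

-- ===== PRECONDITION & SPEC =====
-- Pre_ is exactly the set of inputs on which the Python A returns: A raises IndexError on
-- empty chats (chats[winner_pos]) and when N > len(chats) with the winner absent (chats[i]).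
def Pre_count_unfortunate (N : Int) (winner : String) (chats : List (String × String)) : Prop :=
  chats ≠ [] ∧ (N ≤ (chats.length : Int) ∨ chats.any (fun p => p.1 == winner))
instance (N : Int) (winner : String) (chats : List (String × String)) : Decidable (Pre_count_unfortunate N winner chats) := by unfold Pre_count_unfortunate; infer_instance

def pvWitness_count_unfortunate : Int × String × (List (String × String)) :=
  (3, "bob", [("amy", "duck"), ("bob", "duck"), ("cat", "goose")])

def Spec_count_unfortunate (N : Int) (winner : String) (chats : List (String × String)) (out : Int) : Prop := out = count_unfortunate_alt N winner chats
instance (N : Int) (winner : String) (chats : List (String × String)) (out : Int) : Decidable (Spec_count_unfortunate N winner chats out) := by unfold Spec_count_unfortunate; infer_instance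

-- ===== CLAIM (what is proved, stated in full; the proofs are below) =====
def Claim_equal_count_unfortunate : Prop := ∀ (N : Int) (winner : String) (chats : List (String × String)), Dom_count_unfortunate N winner chats → Pre_count_unfortunate N winner chats → Spec_count_unfortunate N winner chats (count_unfortunate N winner chats)

-- ===== LEMMAS AND PROOFS =====

-- the common reference value: k = first index whose name is the winner;
-- if it exists and is < N, the count of its answer among the earlier answers, else 0
def pvRef (N : Int) (winner : String) (chats : List (String × String)) : Int :=
  let k := chats.findIdx (fun p => p.1 == winner)
  if k < chats.length ∧ (k : Int) < N then
    (((chats.take k).map Prod.snd).count (chats.getD k ("", "")).2 : Int)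
  else 0

theorem pvGoB_spec (N : Int) (winner : String) :
    ∀ (l pre : List (String × String)),
    pvGoB N winner l (pre.length : Int)
      ((pre.map Prod.snd).foldl (fun d x => d.insert x (d.getD x 0 + 1)) PySem.Dict.empty)
    = if l.findIdx (fun p => p.1 == winner) < l.length ∧ ((pre.length : Int) + (l.findIdx (fun p => p.1 == winner) : Int)) < N
      then (((pre ++ l.take (l.findIdx (fun p => p.1 == winner))).map Prod.snd).count (l.getD (l.findIdx (fun p => p.1 == winner)) ("", "")).2 : Int)
      else 0 := by
  intro l
  induction l with
  | nil => intro pre; simp [pvGoB]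
  | cons hd tl ih =>
    intro pre
    obtain ⟨name, answer⟩ := hd
    simp only [pvGoB]
    by_cases hN : N ≤ (pre.length : Int)
    · rw [if_pos hN, if_neg]
      rintro ⟨-, h2⟩
      have := Int.natCast_nonneg (((name, answer) :: tl).findIdx (fun p => p.1 == winner))
      omega
    · rw [if_neg hN]
      by_cases hw : name = winner
      · have hbeq : (name == winner) = true := by simpa using hw
        have hf : ((name, answer) :: tl).findIdx (fun p => p.1 == winner) = 0 := by
          simp [List.findIdx_cons, hbeq]
        rw [if_pos hw, hf, if_pos (by refine ⟨by simp, by push_cast; omega⟩)]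
        simp [PySem.Dict.getD_foldl_insert_add_one, PySem.Dict.getD_empty]
      · have hbeq : (name == winner) = false := by simpa using hw
        have hf : ((name, answer) :: tl).findIdx (fun p => p.1 == winner)
            = tl.findIdx (fun p => p.1 == winner) + 1 := by
          simp [List.findIdx_cons, hbeq]
        rw [if_neg hw]
        have ih' := ih (pre ++ [(name, answer)])
        simp only [List.map_append, List.map_cons, List.map_nil, List.foldl_append,
          List.foldl_cons, List.foldl_nil, List.length_append, List.length_cons,
          List.length_nil, Nat.cast_add, Nat.cast_one, zero_add] at ih'
        rw [ih', hf]
        by_cases hc : tl.findIdx (fun p => p.1 == winner) < tl.length ∧ ((pre.length : Int) + 1 + (tl.findIdx (fun p => p.1 == winner) : Int)) < N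
        · rw [if_pos hc, if_pos (by refine ⟨by simpa using hc.1, by push_cast at hc ⊢; omega⟩)]
          simp [List.take_succ_cons, List.append_assoc]
        · rw [if_neg hc, if_neg]
          rintro ⟨h1, h2⟩
          exact hc ⟨by simpa using h1, by push_cast at h2 ⊢; omega⟩

theorem pvAlt_eq_ref (N : Int) (winner : String) (chats : List (String × String)) :
    count_unfortunate_alt N winner chats = pvRef N winner chats := by
  have h := pvGoB_spec N winner chats []
  simp only [List.length_nil, Nat.cast_zero, zero_add, List.map_nil, List.foldl_nil,
    List.nil_append] at h
  simpa [count_unfortunate_alt, pvRef] using h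

theorem pvFind_cons_some (chats : List (String × String)) (winner : String) (i : Int)
    (rest : List Int) (p : String × String) (h : PySem.List.pyGet? chats i = some p) :
    pvFindWinnerPos chats winner (i :: rest)
    = if p.1 = winner then i else pvFindWinnerPos chats winner rest := by
  simp [pvFindWinnerPos, h]

theorem pvFind_cons_none (chats : List (String × String)) (winner : String) (i : Int)
    (rest : List Int) (h : PySem.List.pyGet? chats i = none) :
    pvFindWinnerPos chats winner (i :: rest) = 0 := by
  simp [pvFindWinnerPos, h]

theorem pvFind_spec (winner : String) (chats : List (String × String)) (N : Int) :
    ∀ (fuel : Nat) (j : Nat), (N - (j : Int)).toNat ≤ fuel →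
    j ≤ chats.findIdx (fun p => p.1 == winner) →
    pvFindWinnerPos chats winner (PySem.List.pyRange (j : Int) N 1)
    = if chats.findIdx (fun p => p.1 == winner) < chats.length ∧ ((chats.findIdx (fun p => p.1 == winner) : Nat) : Int) < N
      then ((chats.findIdx (fun p => p.1 == winner) : Nat) : Int) else 0 := by
  intro fuel
  induction fuel with
  | zero =>
    intro j hfuel hj
    have hNj : N ≤ (j : Int) := by omega
    rw [PySem.List.pyRange_one_eq_nil hNj]
    simp only [pvFindWinnerPos]
    rw [if_neg]
    rintro ⟨-, h2⟩
    have : ((j : Int)) ≤ ((chats.findIdx (fun p => p.1 == winner) : Nat) : Int) := by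
      exact_mod_cast hj
    omega
  | succ fuel ih =>
    intro j hfuel hj
    by_cases hjN : (j : Int) < N
    · rw [PySem.List.pyRange_one_cons hjN]
      by_cases hjl : j < chats.length
      · have hget : PySem.List.pyGet? chats ((j : Nat) : Int) = some chats[j] := by
          simp [hjl]
        rw [pvFind_cons_some chats winner _ _ _ hget]
        by_cases hw : chats[j].1 = winner
        · have hk : chats.findIdx (fun p => p.1 == winner) = j := by
            refine le_antisymm ?_ hj
            by_contra hlt
            have hlt' := Nat.lt_of_not_le hlt
            have hfalse := List.not_of_lt_findIdx (p := fun p => p.1 == winner) (xs := chats) (i := j) hlt'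
            simp at hfalse
            exact hfalse hw
          rw [if_pos hw, hk, if_pos ⟨hjl, hjN⟩]
        · rw [if_neg hw]
          have hjk : j < chats.findIdx (fun p => p.1 == winner) := by
            rcases lt_or_eq_of_le hj with h | h
            · exact h
            · exfalso
              subst h
              have hp := List.findIdx_getElem (p := fun p => p.1 == winner) (xs := chats) (w := hjl)
              simp at hp
              exact hw hp
          have hcast : ((j : Int) + 1) = (((j + 1 : Nat) : Nat) : Int) := by push_cast; ring
          rw [hcast]
          exact ih (j + 1) (by omega) (by omega)
      · have hget : PySem.List.pyGet? chats ((j : Nat) : Int) = none := by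
          simp [List.getElem?_eq_none (by omega : chats.length ≤ j)]
        rw [pvFind_cons_none chats winner _ _ hget]
        have hk : chats.findIdx (fun p => p.1 == winner) ≤ chats.length :=
          List.findIdx_le_length
        rw [if_neg]
        rintro ⟨h1, -⟩
        omega
    · rw [PySem.List.pyRange_one_eq_nil (by omega)]
      simp only [pvFindWinnerPos]
      rw [if_neg]
      rintro ⟨-, h2⟩
      have : ((j : Int)) ≤ ((chats.findIdx (fun p => p.1 == winner) : Nat) : Int) := by
        exact_mod_cast hj
      omega

theorem pvCountLoop (chats : List (String × String)) (k : Nat) (a : String)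
    (hk : k ≤ chats.length) :
    (PySem.List.pyRange 0 (k : Int) 1).foldl
      (fun count i => if (PySem.List.pyGetD chats i ("", "")).2 = a then count + 1 else count) 0
    = (((chats.take k).map Prod.snd).count a : Int) := by
  have hlen : (chats.take k).length = k := by
    simp [Nat.min_eq_left hk]
  calc (PySem.List.pyRange 0 (k : Int) 1).foldl
        (fun count i => if (PySem.List.pyGetD chats i ("", "")).2 = a then count + 1 else count) 0
      = (PySem.List.pyRange 0 ((chats.take k).length : Int) 1).foldl
        (fun count i => if (PySem.List.pyGetD (chats.take k) i ("", "")).2 = a then count + 1 else count) 0 := by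
        rw [hlen]
        apply PySem.List.foldl_congr_mem
        intro acc i hi
        rw [PySem.List.mem_pyRange_one] at hi
        have hilen : i.toNat < k := by omega
        have hi' : i = ((i.toNat : Nat) : Int) := by omega
        rw [hi', PySem.List.pyGetD_natCast, PySem.List.pyGetD_natCast]
        have e1 : (chats.take k).getD i.toNat ("", "") = chats.getD i.toNat ("", "") := by
          simp [List.getD, hilen]
        rw [e1]
    _ = (chats.take k).foldl (fun count p => if p.2 = a then count + 1 else count) (0 : Int) :=
        PySem.List.foldl_pyRange_zero_pyGetD' (chats.take k) ("", "")
        (fun count p => if p.2 = a then count + 1 else count) (0 : Int)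
    _ = 0 + (((chats.take k).countP (fun p => decide (p.2 = a))) : Int) :=
        PySem.List.foldl_ite_add_one _ _ 0
    _ = (((chats.take k).map Prod.snd).count a : Int) := by
        rw [List.count_eq_countP, List.countP_map, zero_add]
        have he : (fun p : String × String => decide (p.2 = a)) = ((fun x => x == a) ∘ Prod.snd) := by
          funext p
          simp only [Function.comp_apply, beq_eq_decide]
        rw [he]

theorem pvA_eq_ref (N : Int) (winner : String) (chats : List (String × String)) :
    count_unfortunate N winner chats = pvRef N winner chats := by
  have hfind := pvFind_spec winner chats N N.toNat 0 (by omega) (Nat.zero_le _)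
  simp only [Nat.cast_zero] at hfind
  simp only [count_unfortunate, pvRef]
  rw [hfind]
  by_cases hc : chats.findIdx (fun p => p.1 == winner) < chats.length ∧ ((chats.findIdx (fun p => p.1 == winner) : Nat) : Int) < N
  · rw [if_pos hc, if_pos hc]
    have hget : PySem.List.pyGet? chats ((chats.findIdx (fun p => p.1 == winner) : Nat) : Int)
        = some chats[chats.findIdx (fun p => p.1 == winner)] := by
      simp [hc.1]
    rw [hget]
    simp only [Option.map_some, Option.getD_some]
    have hgetD : chats.getD (chats.findIdx (fun p => p.1 == winner)) ("", "")
        = chats[chats.findIdx (fun p => p.1 == winner)] := by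
      simp [List.getD, List.getElem?_eq_getElem hc.1]
    rw [hgetD]
    exact pvCountLoop chats (chats.findIdx (fun p => p.1 == winner)) _ (le_of_lt hc.1)
  · rw [if_neg hc, if_neg hc]
    rw [PySem.List.pyRange_one_eq_nil (le_refl 0)]
    simp

-- ===== VERDICT (by name: the statement is the Claim_ definition above) =====
theorem count_unfortunate_spec : Claim_equal_count_unfortunate := by
  intro N winner chats _ _
  unfold Spec_count_unfortunate
  rw [pvA_eq_ref, pvAlt_eq_ref]
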